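-- pv_equiv track=rewrite | github.com/DevHam88/heartgold-data-export-tool | export_scripts/export_level_up_learnsets.py | parse_species_learnset
-- ===== SOURCE A (Python) =====
-- def decode_entry(b0, b1):
--     """Decode a 2-byte level-up entry."""
--     level = b1 // 2
--     move_id = b0 + (256 if b1 & 1 else 0)
--     return move_id, level
--
-- def parse_species_learnset(data, offset, logs):
--     """Parse one species learnset block."""
--     rows = []
--     i = offset
--     n = len(data)
--
--     while i + 1 < n:
--         b0, b1 = data[i], data[i + 1]
--
--         # Detect terminator patterns (FF FF or FF FF 00 00)
--         if b0 == 0xFF and b1 == 0xFF: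
--             # If followed by optional 00 00, consume those too
--             if i + 3 < n and data[i + 2] == 0x00 and data[i + 3] == 0x00:
--                 i += 4
--             else:
--                 i += 2
--             break
--
--         move_id, level = decode_entry(b0, b1)
--         rows.append((move_id, level))
--         i += 2
--
--     return rows, i
-- ===== SOURCE B (Python) =====
-- def decode_entry(b0, b1):
--     """Decode a 2-byte level-up entry."""
--     level = b1 // 2
--     move_id = b0 + (256 if b1 & 1 else 0)
--     return move_id, level
--
--
-- def parse_species_learnset(data, offset, logs):
--     """Parse one species learnset block: locate the terminator first, then decode."""
--     n = len(data)
--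
--     # Pass 1: find the terminator position on the even grid starting at offset.
--     pos = None
--     i = offset
--     while i + 1 < n:
--         if data[i] == 0xFF and data[i + 1] == 0xFF:
--             pos = i
--             break
--         i += 2
--
--     # Pass 2: decode every entry before the terminator (or before the end).
--     rows = [decode_entry(data[j], data[j + 1]) for j in range(offset, i, 2)]
--
--     if pos is None:
--         return rows, i
--     if pos + 3 < n and data[pos + 2] == 0 and data[pos + 3] == 0:
--         return rows, pos + 4
--     return rows, pos + 2
-- ===== Notes on version B (the rewrite author's own statement) =====
-- stated objective: alternative
-- what changed: A decodes entries while scanning in a single accumulating while-loop; B first scans only to locate the terminator position on the even grid, then decodes all entries in one comprehension over range(offset, end, 2) and computes the returned offset from the found position.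
-- outside the precondition, e.g. on parse_species_learnset([1, 2], -5, []): A raises IndexError, B raises IndexError
import Mathlib
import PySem

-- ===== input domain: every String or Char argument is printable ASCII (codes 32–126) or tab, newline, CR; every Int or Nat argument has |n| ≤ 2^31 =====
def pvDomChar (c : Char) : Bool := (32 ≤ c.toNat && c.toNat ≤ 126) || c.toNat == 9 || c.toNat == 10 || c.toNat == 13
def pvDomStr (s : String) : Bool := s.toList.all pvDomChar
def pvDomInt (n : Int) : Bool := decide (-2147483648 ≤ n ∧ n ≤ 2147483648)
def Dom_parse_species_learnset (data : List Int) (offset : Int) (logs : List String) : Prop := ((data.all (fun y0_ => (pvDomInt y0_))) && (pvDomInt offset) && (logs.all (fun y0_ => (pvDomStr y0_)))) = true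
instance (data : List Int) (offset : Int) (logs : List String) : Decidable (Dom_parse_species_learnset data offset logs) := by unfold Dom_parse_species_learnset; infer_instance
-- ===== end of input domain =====

-- B separates terminator search from entry decoding (find the end first, then decode
-- the entries with one comprehension over the index range); same cost, clearer structure.

-- ===== PORT A =====
-- decode_entry, shared verbatim by both Pythons
def pvDecodeEntry (b0 b1 : Int) : Int × Int :=
  let level := PySem.Int.floordiv b1 2
  let move_id := b0 + (if PySem.Int.band b1 1 ≠ 0 then (256 : Int) else 0)
  (move_id, level)

-- A's while-loop: rows accumulated while scanning; pyGetD is exact under Pre_ (indices in range)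
def pvLoopA (data : List Int) (n : Int) (rows : List (Int × Int)) (i : Int) :
    (List (Int × Int)) × Int :=
  if _h : i + 1 < n then
    -- b0, b1 = data[i], data[i+1] (inlined)
    if PySem.List.pyGetD data i 0 = 255 ∧ PySem.List.pyGetD data (i + 1) 0 = 255 then
      if i + 3 < n ∧ PySem.List.pyGetD data (i + 2) 0 = 0 ∧ PySem.List.pyGetD data (i + 3) 0 = 0
      then (rows, i + 4)
      else (rows, i + 2)
    else pvLoopA data n (rows ++ [pvDecodeEntry (PySem.List.pyGetD data i 0) (PySem.List.pyGetD data (i + 1) 0)]) (i + 2)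
  else (rows, i)
termination_by (n - i).toNat
decreasing_by omega

def parse_species_learnset (data : List Int) (offset : Int) (logs : List String) :
    (List (Int × Int)) × Int :=
  pvLoopA data (data.length : Int) [] offset

-- ===== PORT B =====
-- pass 1 of Source B: (pos option, final i) of the terminator search
def pvFindTerm (data : List Int) (n : Int) (i : Int) : Option Int × Int :=
  if _h : i + 1 < n then
    if PySem.List.pyGetD data i 0 = 255 ∧ PySem.List.pyGetD data (i + 1) 0 = 255 then (some i, i)
    else pvFindTerm data n (i + 2)
  else (none, i)
termination_by (n - i).toNat
decreasing_by omega

-- body of Source B's comprehension: decode_entry(data[j], data[j+1])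
def pvRow (data : List Int) (j : Int) : Int × Int :=
  pvDecodeEntry (PySem.List.pyGetD data j 0) (PySem.List.pyGetD data (j + 1) 0)

def parse_species_learnset_alt (data : List Int) (offset : Int) (logs : List String) :
    (List (Int × Int)) × Int :=
  let n : Int := (data.length : Int)
  let r := pvFindTerm data n offset
  let rows := (PySem.List.pyRange offset r.2 2).map (pvRow data)
  match r.1 with
  | none => (rows, r.2)
  | some pos =>
    if pos + 3 < n ∧ PySem.List.pyGetD data (pos + 2) 0 = 0 ∧ PySem.List.pyGetD data (pos + 3) 0 = 0
    then (rows, pos + 4)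
    else (rows, pos + 2)

-- ===== PRECONDITION & SPEC =====
-- Pre_ excludes only inputs where A raises IndexError: offset < -len(data) while the loop is
-- entered (offset + 1 < len(data)) — Python's negative indexing runs off the front; B raises there too.
def Pre_parse_species_learnset (data : List Int) (offset : Int) (logs : List String) : Prop :=
  -(data.length : Int) ≤ offset ∨ (data.length : Int) ≤ offset + 1
instance (data : List Int) (offset : Int) (logs : List String) :
    Decidable (Pre_parse_species_learnset data offset logs) := by
  unfold Pre_parse_species_learnset; infer_instance

def pvWitness_parse_species_learnset : List Int × Int × List String := ([5, 3, 255, 255], 0, [])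

def Spec_parse_species_learnset (data : List Int) (offset : Int) (logs : List String)
    (out : (List (Int × Int)) × Int) : Prop := out = parse_species_learnset_alt data offset logs
instance (data : List Int) (offset : Int) (logs : List String) (out : (List (Int × Int)) × Int) :
    Decidable (Spec_parse_species_learnset data offset logs out) := by
  unfold Spec_parse_species_learnset; infer_instance

-- ===== CLAIM (what is proved, stated in full; the proofs are below) =====
def Claim_equal_parse_species_learnset : Prop := ∀ (data : List Int) (offset : Int) (logs : List String), Dom_parse_species_learnset data offset logs → Pre_parse_species_learnset data offset logs → Spec_parse_species_learnset data offset logs (parse_species_learnset data offset logs)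

-- ===== LEMMAS AND PROOFS =====

-- step-2 range unrolls one element while it is nonempty
lemma pvPyRange_two_cons (a b : Int) (h : a < b) :
    PySem.List.pyRange a b 2 = a :: PySem.List.pyRange (a + 2) b 2 := by
  rw [PySem.List.pyRange_of_pos a b (by norm_num), PySem.List.pyRange_of_pos (a + 2) b (by norm_num)]
  have hm : (if a < b then ((b - a + 2 - 1) / 2).toNat else 0)
      = (if a + 2 < b then ((b - (a + 2) + 2 - 1) / 2).toNat else 0) + 1 := by
    split_ifs <;> omega
  rw [hm, List.range_succ_eq_map]
  simp only [List.map_cons, List.map_map]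
  congr 1
  · push_cast; ring
  · apply List.map_congr_left
    intro k _
    simp only [Function.comp_apply]
    push_cast; ring

-- an empty step-2 range
lemma pvPyRange_two_nil (a b : Int) (h : b ≤ a) : PySem.List.pyRange a b 2 = [] := by
  rw [PySem.List.pyRange_of_pos a b (by norm_num)]
  rw [if_neg (by omega)]
  simp

-- the search never moves the index backwards
lemma pvFindTerm_le (data : List Int) (n : Int) (i : Int) : i ≤ (pvFindTerm data n i).2 := by
  fun_induction pvFindTerm data n i with
  | case1 i h hff => simp
  | case2 i h hff ih => omega
  | case3 i h => simp

-- A's accumulating loop equals B's find-then-decode decomposition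
lemma pvLoopA_eq (data : List Int) (n : Int) (rows : List (Int × Int)) (i : Int) :
    pvLoopA data n rows i =
      (rows ++ (PySem.List.pyRange i (pvFindTerm data n i).2 2).map (pvRow data),
       match (pvFindTerm data n i).1 with
       | none => (pvFindTerm data n i).2
       | some pos =>
         if pos + 3 < n ∧ PySem.List.pyGetD data (pos + 2) 0 = 0 ∧
             PySem.List.pyGetD data (pos + 3) 0 = 0
         then pos + 4 else pos + 2) := by
  fun_induction pvLoopA data n rows i with
  | case1 rows i h hff hzz =>
    rw [pvFindTerm]
    simp only [dif_pos h, if_pos hff, if_pos hzz]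
    simp [pvPyRange_two_nil i i le_rfl]
  | case2 rows i h hff hzz =>
    rw [pvFindTerm]
    simp only [dif_pos h, if_pos hff, if_neg hzz]
    simp [pvPyRange_two_nil i i le_rfl]
  | case3 rows i h hff ih =>
    rw [pvFindTerm]
    simp only [dif_pos h, if_neg hff]
    rw [ih]
    have hlt : i < (pvFindTerm data n (i + 2)).2 := by
      have := pvFindTerm_le data n (i + 2); omega
    rw [pvPyRange_two_cons i _ hlt]
    simp [pvRow]
  | case4 rows i h =>
    rw [pvFindTerm]
    simp only [dif_neg h]
    simp [pvPyRange_two_nil i i le_rfl]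

-- ===== VERDICT (by name: the statement is the Claim_ definition above) =====
theorem parse_species_learnset_spec : Claim_equal_parse_species_learnset := by
  intro data offset logs _hdom _hpre
  unfold Spec_parse_species_learnset parse_species_learnset parse_species_learnset_alt
  rw [pvLoopA_eq]
  rcases hr : (pvFindTerm data (data.length : Int) offset) with ⟨p, e⟩
  cases p <;> simp [hr] <;> split_ifs <;> simp
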